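-- pv_equiv track=rewrite | github.com/ehauckdo/mario | metrics.py | findFlowerPiranhas
-- ===== SOURCE A (Python) =====
-- def findFlowerPiranhas(map_matrix):
-- 	count = 0
-- 	y = 0
-- 	y_len = len(map_matrix[0])
-- 	x_len = len(map_matrix)
-- 	while y < y_len-1:
-- 		x = 1 #start from 1 block below ceiling
-- 		while x < x_len:
-- 			if map_matrix[x][y] == "T" and map_matrix[x][y+1] =="T" and map_matrix[x-1][y] == "-" and map_matrix[x-1][y+1] == "-":
-- 				count += 1
-- 			x += 1
-- 		y += 1
-- 	return count
-- ===== SOURCE B (Python) =====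
-- def findFlowerPiranhas(map_matrix):
--     x_len = len(map_matrix)
--     y_len = len(map_matrix[0])
--     cols = [[row[y] for row in map_matrix] for y in range(y_len)]
--     occ = [{x for x in range(1, x_len) if col[x] == "T" and col[x - 1] == "-"}
--            for col in cols]
--     return sum(len(occ[y] & occ[y + 1]) for y in range(y_len - 1))
-- ===== Notes on version B (the rewrite author's own statement) =====
-- stated objective: alternative
-- what changed: A scans every (x,y) position checking four cells inline; B first transposes the matrix into columns, builds per column the SET of row indices where 'T' sits directly below '-', and then sums the sizes of the intersections of adjacent columns' sets.
-- outside the precondition, e.g. on findFlowerPiranhas([['a'], []]): A returns 0, B raises IndexError; on findFlowerPiranhas([['a', 'b'], ['c']]): A returns 0, B raises IndexError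
import Mathlib
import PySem

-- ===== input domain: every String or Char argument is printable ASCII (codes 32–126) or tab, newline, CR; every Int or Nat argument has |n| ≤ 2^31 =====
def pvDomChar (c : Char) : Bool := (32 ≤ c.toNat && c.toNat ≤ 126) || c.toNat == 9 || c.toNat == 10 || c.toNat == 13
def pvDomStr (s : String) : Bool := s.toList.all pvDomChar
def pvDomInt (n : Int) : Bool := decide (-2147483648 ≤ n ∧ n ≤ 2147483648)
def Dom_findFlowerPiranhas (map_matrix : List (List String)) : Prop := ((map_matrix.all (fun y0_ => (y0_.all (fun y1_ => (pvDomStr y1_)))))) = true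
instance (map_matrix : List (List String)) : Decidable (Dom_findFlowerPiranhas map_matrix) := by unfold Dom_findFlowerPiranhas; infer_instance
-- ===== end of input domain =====

-- B replaces A's flat per-position four-cell scan by a staged algorithm: transpose the
-- matrix into columns, build per column the set of row indices where 'T' sits below '-',
-- and sum the sizes of adjacent columns' set intersections (objective: alternative).


-- ===== PORT A =====
def findFlowerPiranhas (map_matrix : List (List String)) : Int :=
  let y_len : Int := ((PySem.List.pyGetD map_matrix 0 ([] : List String)).length : Int)
  let x_len : Int := (map_matrix.length : Int)
  (PySem.List.pyRange 0 (y_len - 1) 1).foldl (fun count y =>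
    (PySem.List.pyRange 1 x_len 1).foldl (fun count x =>
      if PySem.List.pyGetD (PySem.List.pyGetD map_matrix x []) y "" == "T"
          && PySem.List.pyGetD (PySem.List.pyGetD map_matrix x []) (y + 1) "" == "T"
          && PySem.List.pyGetD (PySem.List.pyGetD map_matrix (x - 1) []) y "" == "-"
          && PySem.List.pyGetD (PySem.List.pyGetD map_matrix (x - 1) []) (y + 1) "" == "-"
      then count + 1 else count) count) 0

-- ===== PORT B =====
def findFlowerPiranhas_alt (map_matrix : List (List String)) : Int :=
  let x_len : Int := (map_matrix.length : Int)
  let y_len : Int := ((PySem.List.pyGetD map_matrix 0 ([] : List String)).length : Int)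
  let cols : List (List String) := (PySem.List.pyRange 0 y_len 1).map (fun y =>
    map_matrix.map (fun row => PySem.List.pyGetD row y ""))
  let occ : List (PySem.Set Int) := cols.map (fun col =>
    PySem.Set.ofList ((PySem.List.pyRange 1 x_len 1).filter (fun x =>
      PySem.List.pyGetD col x "" == "T" && PySem.List.pyGetD col (x - 1) "" == "-")))
  ((PySem.List.pyRange 0 (y_len - 1) 1).map (fun y =>
    PySem.Set.len (PySem.Set.inter (PySem.List.pyGetD occ y PySem.Set.empty)
      (PySem.List.pyGetD occ (y + 1) PySem.Set.empty)))).sum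

-- ===== PRECONDITION & SPEC =====
-- Pre_ excludes inputs where Python raises: the empty matrix (map_matrix[0] is an
-- IndexError in both programs) and ragged matrices with a row shorter than row 0
-- (B's transpose reads every row at every column of row 0 and raises; A's short-
-- circuiting `and` can still return 0 on some of those).
def Pre_findFlowerPiranhas (map_matrix : List (List String)) : Prop :=
  map_matrix ≠ [] ∧ ∀ row ∈ map_matrix, (map_matrix.headI).length ≤ row.length
instance (map_matrix : List (List String)) : Decidable (Pre_findFlowerPiranhas map_matrix) := by unfold Pre_findFlowerPiranhas; infer_instance

def pvWitness_findFlowerPiranhas : List (List String) :=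
  [["-", "-", "x"], ["T", "T", "x"], ["T", "T", "x"]]

def Spec_findFlowerPiranhas (map_matrix : List (List String)) (out : Int) : Prop := out = findFlowerPiranhas_alt map_matrix
instance (map_matrix : List (List String)) (out : Int) : Decidable (Spec_findFlowerPiranhas map_matrix out) := by unfold Spec_findFlowerPiranhas; infer_instance

-- ===== CLAIM (what is proved, stated in full; the proofs are below) =====
def Claim_equal_findFlowerPiranhas : Prop := ∀ (map_matrix : List (List String)), Dom_findFlowerPiranhas map_matrix → Pre_findFlowerPiranhas map_matrix → Spec_findFlowerPiranhas map_matrix (findFlowerPiranhas map_matrix)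

-- ===== LEMMAS AND PROOFS =====

-- A's four-cell test at position (x, y)
def pv_condA (m : List (List String)) (y x : Int) : Bool :=
  PySem.List.pyGetD (PySem.List.pyGetD m x []) y "" == "T"
    && PySem.List.pyGetD (PySem.List.pyGetD m x []) (y + 1) "" == "T"
    && PySem.List.pyGetD (PySem.List.pyGetD m (x - 1) []) y "" == "-"
    && PySem.List.pyGetD (PySem.List.pyGetD m (x - 1) []) (y + 1) "" == "-"

-- B's per-column test: 'T' directly below '-' in column y at row x
def pv_condB (m : List (List String)) (y x : Int) : Bool :=
  PySem.List.pyGetD (m.map (fun row => PySem.List.pyGetD row y "")) x "" == "T"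
    && PySem.List.pyGetD (m.map (fun row => PySem.List.pyGetD row y "")) (x - 1) "" == "-"

-- A as a sum over y of per-column match counts
theorem pv_stepA (m : List (List String)) :
    findFlowerPiranhas m = ((PySem.List.pyRange 0 (((PySem.List.pyGetD m 0 ([] : List String)).length : Int) - 1) 1).map (fun y =>
      ((PySem.List.pyRange 1 (m.length : Int) 1).countP (pv_condA m y) : Int))).sum := by
  unfold findFlowerPiranhas
  rw [PySem.List.foldl_congr_mem
      (g := fun (count : Int) (y : Int) =>
        count + ((PySem.List.pyRange 1 (m.length : Int) 1).countP (pv_condA m y) : Int))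
      (h := by intro acc y _; exact PySem.List.foldl_count_if (pv_condA m y) _ acc)]
  rw [PySem.List.foldl_add]
  simp

-- B's column-index lookup resolved: occ[y] is the filtered row-index list (no dedup needed)
theorem pv_occ (m : List (List String)) (Y y : Int) (h0 : 0 ≤ y) (h1 : y < Y) :
    PySem.List.pyGetD (((PySem.List.pyRange 0 Y 1).map (fun y =>
        m.map (fun row => PySem.List.pyGetD row y ""))).map (fun col =>
      PySem.Set.ofList ((PySem.List.pyRange 1 (m.length : Int) 1).filter (fun x =>
        PySem.List.pyGetD col x "" == "T" && PySem.List.pyGetD col (x - 1) "" == "-"))))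
      y PySem.Set.empty
      = (PySem.List.pyRange 1 (m.length : Int) 1).filter (pv_condB m y) := by
  rw [List.map_map, PySem.List.pyGetD_map_pyRange_of_nonneg _ _ _ _ h0 h1]
  exact PySem.Set.ofList_eq_self_of_nodup _ ((PySem.List.nodup_pyRange_one 1 _).filter _)

-- the intersection of two filters of the same duplicate-free range counts the conjunction
theorem pv_inter_len (m : List (List String)) (y : Int) :
    PySem.Set.len (PySem.Set.inter
        ((PySem.List.pyRange 1 (m.length : Int) 1).filter (pv_condB m y))
        ((PySem.List.pyRange 1 (m.length : Int) 1).filter (pv_condB m (y + 1))))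
      = ((PySem.List.pyRange 1 (m.length : Int) 1).countP
          (fun x => pv_condB m y x && pv_condB m (y + 1) x) : Int) := by
  unfold PySem.Set.inter PySem.Set.len
  rw [List.filter_comm, List.filter_filter]
  rw [List.filter_congr (q := fun x => pv_condB m (y + 1) x && pv_condB m y x)
    (by intro x hx
        rw [PySem.List.mem_pyRange_one] at hx
        simp only [PySem.Set.contains_eq_listContains, List.contains_eq_mem,
          List.mem_filter, PySem.List.mem_pyRange_one]
        cases hB : pv_condB m (y + 1) x <;> simp [hx.1, hx.2])]
  rw [← List.countP_eq_length_filter]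
  congr 1
  exact List.countP_congr (fun x _ => by rw [Bool.and_comm])

-- column lookups resolved back to matrix lookups, for row indices inside the range
theorem pv_cond_eq (m : List (List String)) (y x : Int) (hx : 1 ≤ x) (hX : x < (m.length : Int)) :
    (pv_condB m y x && pv_condB m (y + 1) x) = pv_condA m y x := by
  unfold pv_condA pv_condB
  have hx0 : 0 ≤ x := by omega
  have hx1 : 0 ≤ x - 1 := by omega
  have e1 : ∀ (z : Int) (hz0 : 0 ≤ z) (hz1 : z < (m.length : Int)) (w : Int),
      PySem.List.pyGetD (m.map (fun row => PySem.List.pyGetD row w "")) z ""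
        = PySem.List.pyGetD (PySem.List.pyGetD m z []) w "" := by
    intro z hz0 hz1 w
    rw [PySem.List.pyGetD_eq_getElem _ _ hz0 (by simpa using hz1)]
    rw [List.getElem_map]
    rw [PySem.List.pyGetD_eq_getElem _ _ hz0 hz1]
  rw [e1 x hx0 hX y, e1 x hx0 hX (y + 1), e1 (x - 1) hx1 (by omega) y,
    e1 (x - 1) hx1 (by omega) (y + 1)]
  generalize (PySem.List.pyGetD (PySem.List.pyGetD m x []) y "" == "T") = a
  generalize (PySem.List.pyGetD (PySem.List.pyGetD m x []) (y + 1) "" == "T") = b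
  generalize (PySem.List.pyGetD (PySem.List.pyGetD m (x - 1) []) y "" == "-") = c
  generalize (PySem.List.pyGetD (PySem.List.pyGetD m (x - 1) []) (y + 1) "" == "-") = d
  cases a <;> cases b <;> cases c <;> cases d <;> rfl

-- the two ports compute the same per-column counts
theorem pv_ports_eq (m : List (List String)) :
    findFlowerPiranhas m = findFlowerPiranhas_alt m := by
  rw [pv_stepA]
  unfold findFlowerPiranhas_alt
  refine congrArg List.sum (List.map_congr_left ?_)
  intro y hy
  rw [PySem.List.mem_pyRange_one] at hy
  rw [pv_occ m _ y hy.1 (by omega), pv_occ m _ (y + 1) (by omega) (by omega)]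
  rw [pv_inter_len]
  congr 1
  refine (List.countP_congr ?_).symm
  intro x hx
  rw [PySem.List.mem_pyRange_one] at hx
  rw [pv_cond_eq m y x hx.1 hx.2]

-- ===== VERDICT (by name: the statement is the Claim_ definition above) =====
theorem findFlowerPiranhas_spec : Claim_equal_findFlowerPiranhas := by
  intro m _ _
  unfold Spec_findFlowerPiranhas
  exact pv_ports_eq m
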